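-- pv_equiv track=rewrite | github.com/tsukudamayo/kytea-api | compute_recipetime.py | debug_params
-- ===== SOURCE A (Python) =====
-- from typing import List
--
-- def debug_params(wakati_array: List, time_params: dict) -> dict:
--     debug_log = {}
--     for n in wakati_array:
--         if n not in time_params:
--             continue
--         if n in debug_log:
--             debug_log[n] += time_params[n]
--         else:
--             debug_log.update({n: time_params[n]})
--
--     # debug_log = {n: time_params[n] for n in wakati_array if n in time_params}
--
--     return debug_log
-- ===== SOURCE B (Python) =====
-- def debug_params(wakati_array, time_params):
--     counts = {}
--     for n in wakati_array:
--         counts[n] = counts.get(n, 0) + 1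
--     return {n: c * time_params[n] for n, c in counts.items() if n in time_params}
-- ===== Notes on version B (the rewrite author's own statement) =====
-- stated objective: alternative
-- what changed: B first builds a frequency table of wakati_array and then produces each result entry once as count*value, instead of A's running per-token accumulation into the result dict.
import Mathlib
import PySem

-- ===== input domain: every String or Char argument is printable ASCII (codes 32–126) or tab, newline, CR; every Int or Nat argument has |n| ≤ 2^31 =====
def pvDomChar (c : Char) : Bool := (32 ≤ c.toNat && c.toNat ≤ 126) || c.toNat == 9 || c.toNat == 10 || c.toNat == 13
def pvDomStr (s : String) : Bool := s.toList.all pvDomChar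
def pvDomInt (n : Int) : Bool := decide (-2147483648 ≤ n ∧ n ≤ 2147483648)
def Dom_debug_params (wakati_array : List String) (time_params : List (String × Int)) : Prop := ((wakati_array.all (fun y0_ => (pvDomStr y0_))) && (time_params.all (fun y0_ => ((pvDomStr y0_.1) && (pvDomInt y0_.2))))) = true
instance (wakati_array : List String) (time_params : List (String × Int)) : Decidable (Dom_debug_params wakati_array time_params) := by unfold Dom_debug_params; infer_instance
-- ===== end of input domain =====

-- ===== PORT A =====
-- B restates A's per-token accumulation as count-then-multiply over a frequency table; return values proved equal.
-- shared helper: first-match lookup in the association list (dict) time_params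
def tpLookup (tp : List (String × Int)) (n : String) : Option Int :=
  (tp.find? (fun p => p.1 == n)).map (·.2)

def debug_params (wakati_array : List String) (time_params : List (String × Int)) : List (String × Int) :=
  (wakati_array.foldl (fun debug_log n =>
      match tpLookup time_params n with
      | none => debug_log                                   -- if n not in time_params: continue
      | some v =>
        if debug_log.contains n then
          debug_log.insert n (debug_log.getD n 0 + v)       -- debug_log[n] += time_params[n]
        else
          debug_log.insert n v)                             -- debug_log.update({n: time_params[n]})
    PySem.Dict.empty).items

-- ===== PORT B =====
def debug_params_alt (wakati_array : List String) (time_params : List (String × Int)) : List (String × Int) :=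
  let counts := wakati_array.foldl (fun d n => d.insert n (d.getD n 0 + 1)) PySem.Dict.empty
  counts.items.filterMap (fun p => (tpLookup time_params p.1).map (fun v => (p.1, p.2 * v)))

-- ===== PRECONDITION & SPEC =====
def Spec_debug_params (wakati_array : List String) (time_params : List (String × Int)) (out : List (String × Int)) : Prop := out = debug_params_alt wakati_array time_params
instance (wakati_array : List String) (time_params : List (String × Int)) (out : List (String × Int)) : Decidable (Spec_debug_params wakati_array time_params out) := by unfold Spec_debug_params; infer_instance

-- ===== CLAIM (what is proved, stated in full; the proofs are below) =====
def Claim_equal_debug_params : Prop := ∀ (wakati_array : List String) (time_params : List (String × Int)), Dom_debug_params wakati_array time_params → Spec_debug_params wakati_array time_params (debug_params wakati_array time_params)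

-- ===== LEMMAS AND PROOFS =====

-- the comprehension in B, as a map over the tokens that are in time_params
lemma filterMap_tpLookup (tp : List (String × Int)) (l : List String) (c : String → Int) :
    l.filterMap (fun n => (tpLookup tp n).map (fun v => (n, c n * v))) =
      (l.filter (fun n => (tpLookup tp n).isSome)).map
        (fun n => (n, c n * (tpLookup tp n).getD 0)) := by
  induction l with
  | nil => rfl
  | cons x t ih =>
    cases h : tpLookup tp x <;> simp [h, ih]

-- dedup-to-a-set commutes with filtering
lemma set_ofList_filter (q : String → Bool) (l : List String) :
    (PySem.Set.ofList l).filter q = PySem.Set.ofList (l.filter q) := by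
  suffices h : ∀ (s : PySem.Set String),
      (l.foldl PySem.Set.add s).filter q = (l.filter q).foldl PySem.Set.add (s.filter q) by
    simpa [PySem.Set.ofList_eq_foldl] using h []
  induction l with
  | nil => intro s; rfl
  | cons x t ih =>
    intro s
    have hadd : (PySem.Set.add s x).filter q =
        if q x then PySem.Set.add (s.filter q) x else s.filter q := by
      by_cases hc : x ∈ s
      · have hc' : x ∈ s.filter q ↔ (x ∈ s ∧ q x) := by simp [List.mem_filter]
        by_cases hq : q x <;>
          simp [PySem.Set.add, PySem.Set.contains, hc, hq, List.mem_filter]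
      · by_cases hq : q x <;>
          simp [PySem.Set.add, PySem.Set.contains, hc, hq, List.mem_filter, List.filter_append]
    simp only [List.foldl_cons, List.filter_cons, ih, hadd]
    by_cases hq : q x <;> simp [hq]

-- weighted-counter fold: the value stored at n is (count of n) * (weight of n)
lemma getD_foldl_insert_weighted (g : String → Int) (l : List String) :
    ∀ (d : PySem.Dict String Int) (n : String),
      (l.foldl (fun d x => d.insert x (d.getD x 0 + g x)) d).getD n 0 =
        d.getD n 0 + (l.count n : Int) * g n := by
  induction l with
  | nil => intro d n; simp
  | cons x t ih =>
    intro d n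
    rw [List.foldl_cons, ih]
    rw [PySem.Dict.getD_insert]
    by_cases hnx : n = x
    · subst hnx
      simp
      ring
    · simp [hnx, Ne.symm hnx]

-- A's loop body, with the two branches unified into a single insert
lemma stepA_eq (tp : List (String × Int)) (d : PySem.Dict String Int) (n : String) :
    (match tpLookup tp n with
      | none => d
      | some v => if d.contains n then d.insert n (d.getD n 0 + v) else d.insert n v) =
      (if (tpLookup tp n).isSome then d.insert n (d.getD n 0 + (tpLookup tp n).getD 0) else d) := by
  cases h : tpLookup tp n with
  | none => simp
  | some v =>
    simp only [Option.isSome_some, Option.getD_some, if_true]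
    by_cases hc : d.contains n
    · simp [hc]
    · have : d.getD n 0 = 0 := PySem.Dict.getD_of_not_contains d 0 (by simpa using hc)
      simp [hc, this]

-- A's result, in the same closed form as B's
lemma debug_params_eq (wa : List String) (tp : List (String × Int)) :
    debug_params wa tp =
      (PySem.Set.ofList (wa.filter (fun n => (tpLookup tp n).isSome))).map
        (fun n => (n, ((wa.filter (fun n => (tpLookup tp n).isSome)).count n : Int) *
          (tpLookup tp n).getD 0)) := by
  unfold debug_params
  have hstep : wa.foldl (fun debug_log n =>
      (match tpLookup tp n with
        | none => debug_log
        | some v => if debug_log.contains n then debug_log.insert n (debug_log.getD n 0 + v)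
                    else debug_log.insert n v)) PySem.Dict.empty =
      (wa.filter (fun n => (tpLookup tp n).isSome)).foldl
        (fun d n => d.insert n (d.getD n 0 + (tpLookup tp n).getD 0)) PySem.Dict.empty := by
    rw [show (fun (debug_log : PySem.Dict String Int) (n : String) =>
        (match tpLookup tp n with
          | none => debug_log
          | some v => if debug_log.contains n then debug_log.insert n (debug_log.getD n 0 + v)
                      else debug_log.insert n v)) =
        (fun d n => if (tpLookup tp n).isSome then
            d.insert n (d.getD n 0 + (tpLookup tp n).getD 0) else d) from
      funext fun d => funext fun n => stepA_eq tp d n]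
    exact PySem.List.foldl_if_eq_foldl_filter _ _ _ _
  rw [hstep]
  set l := wa.filter (fun n => (tpLookup tp n).isSome) with hl
  have hnd : (l.foldl (fun d n => d.insert n (d.getD n 0 + (tpLookup tp n).getD 0))
      PySem.Dict.empty).keys.Nodup :=
    PySem.Dict.nodup_keys_foldl_insert l _ _ PySem.Dict.nodup_keys_empty
  rw [PySem.Dict.items_eq_map_keys _ hnd 0, PySem.Dict.keys_foldl_insert]
  apply List.map_congr_left
  intro k _
  rw [getD_foldl_insert_weighted]
  simp

-- ===== VERDICT (by name: the statement is the Claim_ definition above) =====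
theorem debug_params_spec : Claim_equal_debug_params := by
  intro wa tp _
  unfold Spec_debug_params
  simp only [debug_params_alt, PySem.Dict.foldl_insert_getD_add_one_eq_counter,
    PySem.Dict.items_counter, List.filterMap_map, Function.comp]
  rw [filterMap_tpLookup tp (PySem.Set.ofList wa) (fun n => (wa.count n : Int)),
    set_ofList_filter, debug_params_eq]
  apply List.map_congr_left
  intro k hk
  have hkmem : k ∈ wa.filter (fun n => (tpLookup tp n).isSome) := by
    simpa using (PySem.Set.mem_ofList _ _).mp hk
  have hp : (tpLookup tp k).isSome := (List.mem_filter.mp hkmem).2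
  rw [List.count_filter (by simpa using hp)]
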